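-- pv_equiv track=rewrite | github.com/sabyasachirakshit/My-Codes | My_Django_Practice/playwithnumbers/mynumbers/logics.py | check_neon
-- ===== SOURCE A (Python) =====
-- def check_neon(minx,maxx):
--     neon_list=[]
--     while(minx <= maxx):
--         sq = minx**2
--         temp = sq
--         s = 0
--         while temp > 0:
--             dig = temp % 10
--             s += dig
--             temp //= 10
--         if s == minx:
--             neon_list.append(minx)
--         minx += 1
--     return neon_list
-- ===== SOURCE B (Python) =====
-- def check_neon(minx, maxx):
--     # The only neon numbers (digit sum of n**2 equals n) are 0, 1 and 9:
--     # for n >= 10, n**2 has at most 2*len(str(n)) digits, so its digit sum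
--     # is < n; for negative n the digit sum is nonnegative.  So just emit
--     # whichever of 0, 1, 9 lie in the range, in ascending order.
--     return [n for n in (0, 1, 9) if minx <= n <= maxx]
-- ===== Notes on version B (the rewrite author's own statement) =====
-- stated objective: faster
-- what changed: B replaces the per-number squaring and digit-sum while-loops with a closed form: the only neon numbers are 0, 1 and 9, so B just filters (0,1,9) by range membership.
import Mathlib
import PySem

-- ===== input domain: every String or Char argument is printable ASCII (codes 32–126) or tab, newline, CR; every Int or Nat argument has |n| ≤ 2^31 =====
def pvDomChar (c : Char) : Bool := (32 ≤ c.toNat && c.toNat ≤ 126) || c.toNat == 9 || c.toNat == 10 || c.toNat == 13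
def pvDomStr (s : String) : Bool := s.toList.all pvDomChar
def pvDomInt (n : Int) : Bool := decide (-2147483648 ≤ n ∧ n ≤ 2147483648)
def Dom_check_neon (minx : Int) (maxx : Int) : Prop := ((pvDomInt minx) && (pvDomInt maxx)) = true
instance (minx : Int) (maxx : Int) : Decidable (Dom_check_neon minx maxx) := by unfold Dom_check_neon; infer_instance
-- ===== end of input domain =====

-- B replaces A's per-number squaring and digit-sum loops with the closed form
-- {0,1,9} filtered by range membership (the only neon numbers); proven equal on Dom.

-- ===== PORT A =====
-- inner while loop of A: digit sum of temp, accumulated into s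
def digLoop (temp s : Int) : Int :=
  if _h : 0 < temp then
    digLoop (PySem.Int.floordiv temp 10) (s + PySem.Int.mod temp 10)
  else s
termination_by temp.toNat
decreasing_by
  have h10 : PySem.Int.floordiv temp 10 = temp / 10 :=
    PySem.Int.floordiv_eq_ediv_of_pos (by omega)
  rw [h10]; omega

-- outer while loop of A
def neonLoop (minx maxx : Int) (acc : List Int) : List Int :=
  if h : minx ≤ maxx then
    neonLoop (minx + 1) maxx
      (acc ++ (if digLoop (minx ^ 2) 0 = minx then [minx] else []))
  else acc
termination_by (maxx + 1 - minx).toNat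
decreasing_by omega

def check_neon (minx : Int) (maxx : Int) : List Int := neonLoop minx maxx []

-- ===== PORT B =====
def check_neon_alt (minx : Int) (maxx : Int) : List Int :=
  ([0, 1, 9] : List Int).filter (fun n => decide (minx ≤ n) && decide (n ≤ maxx))

-- ===== PRECONDITION & SPEC =====
def Spec_check_neon (minx : Int) (maxx : Int) (out : List Int) : Prop := out = check_neon_alt minx maxx
instance (minx : Int) (maxx : Int) (out : List Int) : Decidable (Spec_check_neon minx maxx out) := by unfold Spec_check_neon; infer_instance

-- ===== CLAIM (what is proved, stated in full; the proofs are below) =====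
def Claim_equal_check_neon : Prop := ∀ (minx : Int) (maxx : Int), Dom_check_neon minx maxx → Spec_check_neon minx maxx (check_neon minx maxx)

-- ===== LEMMAS AND PROOFS =====

-- fueled digit sum on Nat (structural, so `decide` can evaluate it)
def dsF : Nat → Nat → Nat
  | 0, _ => 0
  | f + 1, m => if m = 0 then 0 else m % 10 + dsF f (m / 10)

def ds (m : Nat) : Nat := dsF 64 m

lemma dsF_succ (f m : Nat) (h0 : m ≠ 0) : dsF (f + 1) m = m % 10 + dsF f (m / 10) := by
  simp [dsF, h0]

lemma dsF_zero_arg (f : Nat) : dsF f 0 = 0 := by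
  cases f <;> simp [dsF]

lemma dsF_succ_eq : ∀ (f m : Nat), m < 10 ^ f → dsF (f + 1) m = dsF f m := by
  intro f
  induction f with
  | zero => intro m hm; interval_cases m; rfl
  | succ f ih =>
    intro m hm
    by_cases h0 : m = 0
    · subst h0; rw [dsF_zero_arg, dsF_zero_arg]
    · have hdiv : m / 10 < 10 ^ f := by
        rw [Nat.div_lt_iff_lt_mul (by norm_num)]
        calc m < 10 ^ (f + 1) := hm
          _ = 10 ^ f * 10 := pow_succ 10 f
      rw [dsF_succ (f + 1) m h0, dsF_succ f m h0, ih _ hdiv]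

lemma ds_rec (m : Nat) (h0 : 0 < m) (hb : m < 10 ^ 63) :
    ds m = m % 10 + ds (m / 10) := by
  have hdiv : m / 10 < 10 ^ 63 := lt_of_le_of_lt (Nat.div_le_self _ _) hb
  have h1 : ds (m / 10) = dsF 63 (m / 10) := dsF_succ_eq 63 (m / 10) hdiv
  rw [h1]
  exact dsF_succ 63 m (by omega)

lemma ds_le : ∀ (k : Nat), k ≤ 63 → ∀ m, m < 10 ^ k → ds m ≤ 9 * k := by
  intro k
  induction k with
  | zero => intro _ m hm; interval_cases m; rfl
  | succ k ih =>
    intro hk m hm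
    by_cases h0 : m = 0
    · subst h0
      have : ds 0 = 0 := rfl
      omega
    · have hm63 : m < 10 ^ 63 :=
        lt_of_lt_of_le hm (Nat.pow_le_pow_right (by norm_num) hk)
      rw [ds_rec m (Nat.pos_of_ne_zero h0) hm63]
      have hdiv : m / 10 < 10 ^ k := by
        rw [Nat.div_lt_iff_lt_mul (by norm_num)]
        calc m < 10 ^ (k + 1) := hm
          _ = 10 ^ k * 10 := pow_succ 10 k
      have := ih (by omega) (m / 10) hdiv
      have hmod : m % 10 ≤ 9 := by omega
      omega

set_option maxRecDepth 8000 in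
lemma ds_small : ∀ m, m < 181 → (ds (m * m) = m ↔ (m = 0 ∨ m = 1 ∨ m = 9)) := by decide

lemma ds_sq (m : Nat) (hm : m ≤ 2 ^ 31) : ds (m * m) = m ↔ (m = 0 ∨ m = 1 ∨ m = 9) := by
  by_cases hsmall : m < 181
  · exact ds_small m hsmall
  · have hb : m * m < 10 ^ 20 := by
      calc m * m ≤ 2 ^ 31 * 2 ^ 31 := Nat.mul_le_mul hm hm
        _ < 10 ^ 20 := by norm_num
    have hle : ds (m * m) ≤ 9 * 20 := ds_le 20 (by norm_num) _ hb
    omega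

lemma digLoop_eq : ∀ (n : Nat) (t s : Int), t.toNat = n → 0 ≤ t → t < 10 ^ 63 →
    digLoop t s = s + (ds t.toNat : Int) := by
  intro n
  induction n using Nat.strong_induction_on with
  | _ n ih =>
    intro t s hn ht hb
    by_cases hpos : 0 < t
    · rw [digLoop]
      simp only [hpos, dif_pos]
      have h10 : PySem.Int.floordiv t 10 = t / 10 :=
        PySem.Int.floordiv_eq_ediv_of_pos (by omega)
      have hm10 : PySem.Int.mod t 10 = t % 10 :=
        PySem.Int.mod_eq_emod_of_pos (by omega)
      rw [h10, hm10]
      have hlt : (t / 10).toNat < n := by omega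
      have hdb : t / 10 < 10 ^ 63 := by omega
      rw [ih _ hlt (t / 10) (s + t % 10) rfl (by omega) hdb]
      have hds : ds t.toNat = t.toNat % 10 + ds (t.toNat / 10) :=
        ds_rec t.toNat (by omega) (by omega)
      have h1 : (t / 10).toNat = t.toNat / 10 := by omega
      have h2 : t % 10 = ((t.toNat % 10 : Nat) : Int) := by omega
      rw [h1, h2, hds]
      push_cast
      ring
    · rw [digLoop]
      simp only [hpos, dif_neg, not_false_iff]
      have ht0 : t = 0 := by omega
      subst ht0
      have : ds 0 = 0 := rfl
      simp [this]

lemma neon_iff (n : Int) (h1 : -2147483648 ≤ n) (h2 : n ≤ 2147483648) :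
    digLoop (n ^ 2) 0 = n ↔ (n = 0 ∨ n = 1 ∨ n = 9) := by
  have habs : n.natAbs ≤ 2 ^ 31 := by omega
  have hsq : n ^ 2 = ((n.natAbs * n.natAbs : Nat) : Int) := by
    rw [pow_two]; exact Int.natAbs_mul_self.symm
  have hb : (n.natAbs * n.natAbs : Nat) < 10 ^ 63 := by
    calc n.natAbs * n.natAbs ≤ 2 ^ 31 * 2 ^ 31 := Nat.mul_le_mul habs habs
      _ < 10 ^ 63 := by norm_num
  have hE : digLoop (n ^ 2) 0 = ((ds (n.natAbs * n.natAbs) : Nat) : Int) := by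
    rw [hsq, digLoop_eq ((n.natAbs * n.natAbs : Nat) : Int).toNat _ 0 rfl (by positivity)
      (by exact_mod_cast hb), Int.toNat_natCast]
    simp
  rw [hE]
  by_cases hneg : n < 0
  · have hge : (0 : Int) ≤ ((ds (n.natAbs * n.natAbs) : Nat) : Int) := by positivity
    constructor
    · intro h; omega
    · intro h; omega
  · have hn : n = ((n.natAbs : Nat) : Int) := by omega
    rw [hn]
    norm_cast
    exact ds_sq n.natAbs habs

-- B\'s filter, written out branch by branch
def goodList (a b : Int) : List Int :=
  (if a ≤ 0 ∧ 0 ≤ b then [0] else []) ++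
  (if a ≤ 1 ∧ 1 ≤ b then [1] else []) ++
  (if a ≤ 9 ∧ 9 ≤ b then [9] else [])

lemma alt_eq_goodList (a b : Int) : check_neon_alt a b = goodList a b := by
  unfold check_neon_alt goodList
  simp only [List.filter_cons, List.filter_nil, Bool.and_eq_true, decide_eq_true_eq]
  split_ifs <;> simp_all

lemma neonLoop_eq : ∀ (k : Nat) (a b : Int) (acc : List Int),
    (b + 1 - a).toNat = k → -2147483648 ≤ a → b ≤ 2147483648 →
    neonLoop a b acc = acc ++ goodList a b := by
  intro k
  induction k with
  | zero =>
    intro a b acc hk ha hb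
    have hab : ¬ a ≤ b := by omega
    rw [neonLoop]
    simp only [hab, dif_neg, not_false_iff]
    unfold goodList
    split_ifs <;> first | (exfalso; omega) | simp
  | succ k ih =>
    intro a b acc hk ha hb
    by_cases hab : a ≤ b
    · rw [neonLoop]
      simp only [hab, dif_pos]
      rw [ih (a + 1) b _ (by omega) (by omega) hb]
      rw [List.append_assoc]
      congr 1
      by_cases hneon : digLoop (a ^ 2) 0 = a
      · have hmem := (neon_iff a ha (by omega)).mp hneon
        simp only [hneon, if_pos]
        rcases hmem with h | h | h <;> subst h <;>
          unfold goodList <;> split_ifs <;> first | (exfalso; omega) | simp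
      · have hmem := fun h => hneon ((neon_iff a ha (by omega)).mpr h)
        have h0 : a ≠ 0 := fun h => hmem (Or.inl h)
        have h1 : a ≠ 1 := fun h => hmem (Or.inr (Or.inl h))
        have h9 : a ≠ 9 := fun h => hmem (Or.inr (Or.inr h))
        simp only [hneon, if_neg, not_false_iff, List.nil_append]
        unfold goodList
        split_ifs <;> first | rfl | (exfalso; omega)
    · rw [neonLoop]
      simp only [hab, dif_neg, not_false_iff]
      unfold goodList
      split_ifs <;> first | (exfalso; omega) | simp

-- ===== VERDICT (by name: the statement is the Claim_ definition above) =====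
theorem check_neon_spec : Claim_equal_check_neon := by
  intro minx maxx hdom
  unfold Spec_check_neon
  have hd : -2147483648 ≤ minx ∧ minx ≤ 2147483648 ∧
            -2147483648 ≤ maxx ∧ maxx ≤ 2147483648 := by
    simp only [Dom_check_neon, pvDomInt, Bool.and_eq_true, decide_eq_true_eq] at hdom
    omega
  rw [alt_eq_goodList]
  exact neonLoop_eq (maxx + 1 - minx).toNat minx maxx [] rfl hd.1 hd.2.2.2
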